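-- pv_equiv track=rewrite | github.com/densolo/trimesh-samples-measure | demo1.py | split_point_buckets
-- ===== SOURCE A (Python) =====
-- def split_point_buckets(points, dim, dist):
--     points = sorted(points, key=lambda p: p[dim])
--
--     prev_p = points[0]
--     cur_bucket = [prev_p]
--     buckets = [cur_bucket]
--
--     for p in points[1:]:
--         if p[dim] - prev_p[dim] > dist:
--             cur_bucket = []
--             buckets.append(cur_bucket)
--         cur_bucket.append(p)
--         prev_p = p
--
--     return buckets
-- ===== SOURCE B (Python) =====
-- def split_point_buckets(points, dim, dist):
--     # Run-extraction: repeatedly peel off the maximal leading chain of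
--     # close points from the sorted remainder.
--     buckets = []
--     rest = sorted(points, key=lambda p: p[dim])
--     while rest:
--         bucket = [rest[0]]
--         rest = rest[1:]
--         while rest and rest[0][dim] - bucket[-1][dim] <= dist:
--             bucket.append(rest[0])
--             rest = rest[1:]
--         buckets.append(bucket)
--     return buckets
-- ===== Notes on version B (the rewrite author's own statement) =====
-- stated objective: alternative
-- what changed: Instead of one pass mutating a shared current-bucket list through aliasing with a tracked previous point, B repeatedly extracts the maximal leading run of close points from the sorted remainder (nested run-peeling loops, comparing against the bucket's own last element).
import Mathlib
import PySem

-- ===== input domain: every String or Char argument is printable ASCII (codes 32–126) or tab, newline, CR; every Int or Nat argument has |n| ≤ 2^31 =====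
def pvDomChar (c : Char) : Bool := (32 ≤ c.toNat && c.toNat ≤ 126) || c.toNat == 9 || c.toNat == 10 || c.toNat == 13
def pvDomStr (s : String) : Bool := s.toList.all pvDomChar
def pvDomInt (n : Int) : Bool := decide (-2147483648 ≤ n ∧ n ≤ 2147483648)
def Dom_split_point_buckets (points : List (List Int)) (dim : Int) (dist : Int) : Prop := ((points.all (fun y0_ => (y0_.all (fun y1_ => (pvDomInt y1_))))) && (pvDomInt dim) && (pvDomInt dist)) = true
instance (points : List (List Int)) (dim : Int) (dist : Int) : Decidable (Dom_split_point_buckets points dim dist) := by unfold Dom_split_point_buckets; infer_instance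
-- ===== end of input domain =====

-- B replaces A's aliasing single-pass bucket mutation by nested run-peeling from the sorted remainder (alternative decomposition); equal wherever A returns.


-- ===== PORT A =====
-- points = sorted(points, key=…); prev_p/cur_bucket/buckets loop (aliasing modelled by
-- carrying the current bucket separately and appending it at the end).
def split_point_buckets (points : List (List Int)) (dim : Int) (dist : Int) : List (List (List Int)) :=
  let pts := PySem.List.sorted points (fun p => PySem.List.pyGetD p dim 0) false
  match pts with
  | [] => []   -- Python raises IndexError on points[0]; excluded by Pre_
  | p0 :: rest =>
    let st := rest.foldl
      (fun (st : (List Int) × List (List Int) × List (List (List Int))) p =>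
        if PySem.List.pyGetD p dim 0 - PySem.List.pyGetD st.1 dim 0 > dist then
          (p, [p], st.2.2 ++ [st.2.1])
        else
          (p, st.2.1 ++ [p], st.2.2))
      (p0, [p0], ([] : List (List (List Int))))
    st.2.2 ++ [st.2.1]

-- ===== PORT B =====
-- inner while: extend bucket while rest[0][dim] - bucket[-1][dim] <= dist, returns (bucket, rest)
def spbInner (dim dist : Int) : List (List Int) → List (List Int) → (List (List Int)) × List (List Int)
  | bucket, r :: rs =>
      if PySem.List.pyGetD r dim 0 - PySem.List.pyGetD (PySem.List.pyGetD bucket (-1) []) dim 0 ≤ dist then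
        spbInner dim dist (bucket ++ [r]) rs
      else (bucket, r :: rs)
  | bucket, [] => (bucket, [])

-- outer while: peel one maximal run per iteration (fuel = initial length, a totality
-- guard only: the remainder shrinks by at least one per iteration)
def spbOuter (dim dist : Int) : Nat → List (List Int) → List (List (List Int))
  | _, [] => []
  | 0, _ :: _ => []   -- unreachable with fuel ≥ length
  | fuel + 1, r :: rs =>
    let res := spbInner dim dist [r] rs
    res.1 :: spbOuter dim dist fuel res.2

def split_point_buckets_alt (points : List (List Int)) (dim : Int) (dist : Int) : List (List (List Int)) :=
  let pts := PySem.List.sorted points (fun p => PySem.List.pyGetD p dim 0) false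
  spbOuter dim dist pts.length pts

-- ===== PRECONDITION & SPEC =====
-- A raises IndexError on empty points (points[0]) and whenever some point lacks index dim; exactly those inputs are excluded.
def Pre_split_point_buckets (points : List (List Int)) (dim : Int) (dist : Int) : Prop :=
  points ≠ [] ∧ ∀ p ∈ points, PySem.Raise.InRange p.length dim
instance (points : List (List Int)) (dim : Int) (dist : Int) : Decidable (Pre_split_point_buckets points dim dist) := by unfold Pre_split_point_buckets; infer_instance

def pvWitness_split_point_buckets : List (List Int) × Int × Int := ([[0], [5], [6]], 0, 1)

def Spec_split_point_buckets (points : List (List Int)) (dim : Int) (dist : Int) (out : List (List (List Int))) : Prop := out = split_point_buckets_alt points dim dist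
instance (points : List (List Int)) (dim : Int) (dist : Int) (out : List (List (List Int))) : Decidable (Spec_split_point_buckets points dim dist out) := by unfold Spec_split_point_buckets; infer_instance

-- ===== CLAIM (what is proved, stated in full; the proofs are below) =====
def Claim_equal_split_point_buckets : Prop := ∀ (points : List (List Int)) (dim : Int) (dist : Int), Dom_split_point_buckets points dim dist → Pre_split_point_buckets points dim dist → Spec_split_point_buckets points dim dist (split_point_buckets points dim dist)
-- ===== LEMMAS AND PROOFS =====

theorem pyGetD_last_singleton (p : List Int) :
    PySem.List.pyGetD ([p] : List (List Int)) (-1) ([] : List Int) = p := by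
  have := PySem.List.pyGetD_neg_one_append_singleton (xs := ([] : List (List Int))) (x := p) (d := ([] : List Int))
  simpa using this

-- The core bridge: A's fold with state (prev, cur, done) equals done ++ B's run-peeling,
-- given the invariant that cur's last element is prev and enough fuel.
theorem fold_eq_peel (dim dist : Int) :
    ∀ (rest : List (List Int)) (prev : List Int) (cur : List (List Int)) (done : List (List (List Int))) (fuel : Nat),
      rest.length ≤ fuel →
      PySem.List.pyGetD cur (-1) ([] : List Int) = prev →
      ((rest.foldl
          (fun (st : (List Int) × List (List Int) × List (List (List Int))) p =>
            if PySem.List.pyGetD p dim 0 - PySem.List.pyGetD st.1 dim 0 > dist then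
              (p, [p], st.2.2 ++ [st.2.1])
            else
              (p, st.2.1 ++ [p], st.2.2))
          (prev, cur, done)).2.2
        ++ [(rest.foldl
          (fun (st : (List Int) × List (List Int) × List (List (List Int))) p =>
            if PySem.List.pyGetD p dim 0 - PySem.List.pyGetD st.1 dim 0 > dist then
              (p, [p], st.2.2 ++ [st.2.1])
            else
              (p, st.2.1 ++ [p], st.2.2))
          (prev, cur, done)).2.1])
      = done ++ ((spbInner dim dist cur rest).1 :: spbOuter dim dist fuel (spbInner dim dist cur rest).2) := by
  intro rest
  induction rest with
  | nil =>
    intro prev cur done fuel _ _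
    cases fuel <;> simp [spbInner, spbOuter]
  | cons p ps ih =>
    intro prev cur done fuel hfuel hlast
    by_cases hgap : PySem.List.pyGetD p dim 0 - PySem.List.pyGetD prev dim 0 > dist
    · -- gap: A starts a new bucket; B's inner loop stops at p
      have hin : spbInner dim dist cur (p :: ps) = (cur, p :: ps) := by
        simp only [spbInner, hlast]
        rw [if_neg (by omega)]
      obtain ⟨f, rfl⟩ : ∃ f, fuel = f + 1 := by
        cases fuel with
        | zero => simp at hfuel
        | succ f => exact ⟨f, rfl⟩
      have ihh := ih p [p] (done ++ [cur]) f (by simpa using hfuel) (pyGetD_last_singleton p)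
      rw [hin]
      simp only [List.foldl_cons, if_pos hgap]
      rw [ihh]
      simp [spbOuter]
    · -- close: A appends p to cur; B's inner loop consumes p
      have hin : spbInner dim dist cur (p :: ps) = spbInner dim dist (cur ++ [p]) ps := by
        simp only [spbInner, hlast]
        rw [if_pos (by omega)]
      have ihh := ih p (cur ++ [p]) done fuel (Nat.le_of_succ_le (by simpa using hfuel))
        (PySem.List.pyGetD_neg_one_append_singleton (xs := cur) (x := p) (d := ([] : List Int)))
      rw [hin]
      simp only [List.foldl_cons, if_neg hgap]
      rw [ihh]

-- ===== VERDICT (by name: the statement is the Claim_ definition above) =====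
theorem split_point_buckets_spec : Claim_equal_split_point_buckets := by
  unfold Claim_equal_split_point_buckets
  intro points dim dist _ _
  unfold Spec_split_point_buckets split_point_buckets split_point_buckets_alt
  cases h : PySem.List.sorted points (fun p => PySem.List.pyGetD p dim 0) false with
  | nil => simp [spbOuter]
  | cons p0 rest =>
    have hb := fold_eq_peel dim dist rest p0 [p0] [] rest.length (Nat.le_refl _) (pyGetD_last_singleton p0)
    simp only [List.length_cons, spbOuter]
    simpa using hb
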